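-- pv_equiv track=rewrite | github.com/tanmoyjana/utility_tester | submission/riyanka/assignment2.py | getMaximumPoints
-- ===== SOURCE A (Python) =====
-- def getMaximumPoints(A, B, C, N):
--     totalpoints = 0
--     for i in range(0, N):
--         x = max(A, B, C)
--         if (x >= 1):
--             totalpoints = totalpoints+x
--             if (x == A):
--                 A = A-1
--             elif (x == B):
--                 B = B-1
--             else:
--                 C = C-1
--             i = i+1
--         else:
--             x = max(A, B, C)
--     return totalpoints
-- ===== SOURCE B (Python) =====
-- def getMaximumPoints(A, B, C, N):
--     total = 0
--     rem = N
--     x = max(A, B, C)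
--     while x >= 1:
--         cnt = (A >= x) + (B >= x) + (C >= x)
--         take = min(rem, cnt)
--         if take <= 0:
--             break
--         total += take * x
--         rem -= take
--         x -= 1
--     return total
-- ===== Notes on version B (the rewrite author's own statement) =====
-- stated objective: alternative
-- what changed: Replaces A's one-pick-per-iteration greedy simulation (N loop iterations, re-taking the max each time) by a single descending scan over value levels from max(A,B,C) that takes all picks of each value in one batch, stopping when N picks are exhausted (min(N, max(A,B,C)) iterations).
import Mathlib
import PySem

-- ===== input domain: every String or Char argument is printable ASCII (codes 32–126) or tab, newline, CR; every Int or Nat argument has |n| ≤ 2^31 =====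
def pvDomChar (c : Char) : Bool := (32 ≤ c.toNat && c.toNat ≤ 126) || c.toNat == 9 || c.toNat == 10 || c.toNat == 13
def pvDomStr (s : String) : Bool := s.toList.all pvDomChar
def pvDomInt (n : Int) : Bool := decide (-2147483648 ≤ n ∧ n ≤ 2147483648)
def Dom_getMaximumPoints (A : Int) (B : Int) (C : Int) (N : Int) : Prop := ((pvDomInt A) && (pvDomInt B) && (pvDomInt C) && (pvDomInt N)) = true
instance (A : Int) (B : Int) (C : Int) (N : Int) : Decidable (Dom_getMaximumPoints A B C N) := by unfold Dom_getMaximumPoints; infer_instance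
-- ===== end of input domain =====

-- B replaces A's one-pick-per-iteration simulation by a scan over value levels that takes
-- all picks of each value at once (objective: alternative decomposition; runs min(N, max) steps).

-- ===== PORT A =====
-- A's for-loop: N iterations, each picks max(A,B,C), adds it and decrements that pile if ≥ 1.
def pvAloop (A B C tot : Int) : Nat → Int
  | 0 => tot
  | Nat.succ k =>
    let x := max (max A B) C
    if 1 ≤ x then
      if x = A then pvAloop (A - 1) B C (tot + x) k
      else if x = B then pvAloop A (B - 1) C (tot + x) k
      else pvAloop A B (C - 1) (tot + x) k
    else pvAloop A B C tot k

def getMaximumPoints (A : Int) (B : Int) (C : Int) (N : Int) : Int :=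
  pvAloop A B C 0 N.toNat

-- ===== PORT B =====
-- number of piles whose value is ≥ x
def pvCnt (A B C x : Int) : Int :=
  (if x ≤ A then 1 else 0) + (if x ≤ B then 1 else 0) + (if x ≤ C then 1 else 0)

-- B's while-loop: x runs from max(A,B,C) down to 1; fuel = x.toNat, the Int level is k+1.
def pvLvl (A B C : Int) : Nat → Int → Int → Int
  | 0, _, acc => acc
  | Nat.succ k, rem, acc =>
    let x : Int := (Nat.succ k : Nat)
    let take := min rem (pvCnt A B C x)
    if take ≤ 0 then acc
    else pvLvl A B C k (rem - take) (acc + take * x)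

def getMaximumPoints_alt (A : Int) (B : Int) (C : Int) (N : Int) : Int :=
  pvLvl A B C (max (max A B) C).toNat N 0

-- ===== PRECONDITION & SPEC =====
def Spec_getMaximumPoints (A : Int) (B : Int) (C : Int) (N : Int) (out : Int) : Prop := out = getMaximumPoints_alt A B C N
instance (A : Int) (B : Int) (C : Int) (N : Int) (out : Int) : Decidable (Spec_getMaximumPoints A B C N out) := by unfold Spec_getMaximumPoints; infer_instance

-- ===== CLAIM (what is proved, stated in full; the proofs are below) =====
def Claim_equal_getMaximumPoints : Prop := ∀ (A : Int) (B : Int) (C : Int) (N : Int), Dom_getMaximumPoints A B C N → Spec_getMaximumPoints A B C N (getMaximumPoints A B C N)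

-- ===== LEMMAS AND PROOFS =====

lemma pvLvl_nonpos (A B C : Int) (k : Nat) (rem acc : Int) (h : rem ≤ 0) :
    pvLvl A B C k rem acc = acc := by
  cases k with
  | zero => rfl
  | succ k =>
    simp only [pvLvl]
    rw [if_pos (le_trans (min_le_left _ _) h)]

lemma pvLvl_acc (A B C : Int) (k : Nat) :
    ∀ rem acc, pvLvl A B C k rem acc = acc + pvLvl A B C k rem 0 := by
  induction k with
  | zero => intro rem acc; simp [pvLvl]
  | succ k ih =>
    intro rem acc
    simp only [pvLvl]
    by_cases h : min rem (pvCnt A B C ((Nat.succ k : Nat) : Int)) ≤ 0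
    · rw [if_pos h, if_pos h]; ring
    · rw [if_neg h, if_neg h, ih, ih _ (0 + _)]; ring

lemma pvLvl_congr (A B C A' B' C' : Int) (k : Nat)
    (h : ∀ x : Int, 1 ≤ x → x ≤ (k : Int) → pvCnt A B C x = pvCnt A' B' C' x) :
    ∀ rem acc, pvLvl A B C k rem acc = pvLvl A' B' C' k rem acc := by
  induction k with
  | zero => intro rem acc; rfl
  | succ k ih =>
    intro rem acc
    have hx : pvCnt A B C ((Nat.succ k : Nat) : Int) = pvCnt A' B' C' ((Nat.succ k : Nat) : Int) := by
      apply h <;> push_cast <;> omega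
    simp only [pvLvl, hx]
    by_cases hb : min rem (pvCnt A' B' C' ((Nat.succ k : Nat) : Int)) ≤ 0
    · rw [if_pos hb, if_pos hb]
    · rw [if_neg hb, if_neg hb]
      exact ih (fun x h1 h2 => h x h1 (by push_cast at h2 ⊢; omega)) _ _

lemma pvCnt_swap12 (A B C x : Int) : pvCnt A B C x = pvCnt B A C x := by
  simp only [pvCnt]; ring

lemma pvCnt_rot (A B C x : Int) : pvCnt A B C x = pvCnt C A B x := by
  simp only [pvCnt]; ring

-- peeling one greedy pick off the level scan, when the first pile is the maximum
lemma pvStep (A B C rem : Int) (hA1 : 1 ≤ A) (hB : B ≤ A) (hC : C ≤ A) (hr : 1 ≤ rem) :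
    pvLvl A B C A.toNat rem 0
      = A + pvLvl (A - 1) B C (max (max (A - 1) B) C).toNat (rem - 1) 0 := by
  obtain ⟨k, hk⟩ : ∃ k, A.toNat = k + 1 := by
    refine ⟨A.toNat - 1, ?_⟩; omega
  have hkA : ((k + 1 : Nat) : Int) = A := by omega
  have hcnt1 : (1 : Int) ≤ pvCnt A B C A := by
    simp only [pvCnt]; split_ifs <;> omega
  by_cases h2 : B = A ∨ C = A
  · -- at least two piles at the max: the new state still has max = A
    have hmax : max (max (A - 1) B) C = A := by
      rcases h2 with h | h <;> omega
    have hcnt2 : (2 : Int) ≤ pvCnt A B C A := by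
      simp only [pvCnt]; split_ifs <;> omega
    have hcnt' : pvCnt (A - 1) B C A = pvCnt A B C A - 1 := by
      simp only [pvCnt]; split_ifs <;> omega
    rw [hk, hmax, hk]
    simp only [pvLvl, hkA]
    rw [if_neg (by omega), hcnt']
    by_cases hb : min (rem - 1) (pvCnt A B C A - 1) ≤ 0
    · -- rem = 1 (cnt ≥ 2): left takes one pick then runs out
      have hrem1 : rem = 1 := by omega
      rw [if_pos hb, hrem1]
      have : min (1 : Int) (pvCnt A B C A) = 1 := by omega
      rw [this, pvLvl_nonpos _ _ _ _ _ _ (by omega)]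
      ring
    · rw [if_neg hb]
      have hmin : min rem (pvCnt A B C A) = min (rem - 1) (pvCnt A B C A - 1) + 1 := by omega
      rw [pvLvl_acc, pvLvl_acc (A - 1)]
      rw [pvLvl_congr A B C (A - 1) B C k
        (by intro x h1 h2; simp only [pvCnt]; split_ifs <;> omega)]
      rw [hmin]
      ring_nf
  · -- unique maximum: cnt = 1, new max is A - 1
    simp only [not_or] at h2
    have hcnt : pvCnt A B C A = 1 := by
      simp only [pvCnt]; split_ifs <;> omega
    have hmax : max (max (A - 1) B) C = A - 1 := by omega
    have hk' : (A - 1).toNat = k := by omega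
    rw [hk, hmax, hk']
    simp only [pvLvl, hkA, hcnt]
    rw [if_neg (by omega)]
    have hmin : min rem (1 : Int) = 1 := by omega
    rw [hmin, pvLvl_acc]
    rw [pvLvl_congr A B C (A - 1) B C k
      (by intro x h1 h2; simp only [pvCnt]; split_ifs <;> omega)]
    ring

lemma pvAloop_acc (n : Nat) : ∀ A B C t : Int, pvAloop A B C t n = t + pvAloop A B C 0 n := by
  induction n with
  | zero => intro A B C t; simp [pvAloop]
  | succ n ih =>
    intro A B C t
    simp only [pvAloop]
    split_ifs
    · rw [ih, ih _ _ _ (0 + _)]; ring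
    · rw [ih, ih _ _ _ (0 + _)]; ring
    · rw [ih, ih _ _ _ (0 + _)]; ring
    · rw [ih]

lemma pvAloop_stall (n : Nat) : ∀ A B C t : Int, max (max A B) C ≤ 0 → pvAloop A B C t n = t := by
  induction n with
  | zero => intro A B C t _; rfl
  | succ n ih =>
    intro A B C t h
    simp only [pvAloop]
    rw [if_neg (by omega)]
    exact ih A B C t h

lemma pvMain (n : Nat) : ∀ A B C : Int,
    pvAloop A B C 0 n = pvLvl A B C (max (max A B) C).toNat (n : Int) 0 := by
  induction n with
  | zero =>
    intro A B C
    rw [pvLvl_nonpos _ _ _ _ _ _ (by norm_num)]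
    rfl
  | succ n ih =>
    intro A B C
    by_cases hx : 1 ≤ max (max A B) C
    · have hrem : (1 : Int) ≤ ((n + 1 : Nat) : Int) := by push_cast; omega
      simp only [pvAloop]
      rw [if_pos hx]
      by_cases hA : max (max A B) C = A
      · rw [if_pos hA, pvAloop_acc, ih, hA]
        have := pvStep A B C ((n + 1 : Nat) : Int) (by omega) (by omega) (by omega) hrem
        rw [this]
        have : (((n + 1 : Nat) : Int) - 1) = (n : Int) := by push_cast; omega
        rw [this]; ring
      · by_cases hBm : max (max A B) C = B
        · rw [if_neg hA, if_pos hBm, pvAloop_acc, ih]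
          have hswap : ∀ B' r : Int, pvLvl A B' C (max (max A B') C).toNat r 0
              = pvLvl B' A C (max (max B' A) C).toNat r 0 := by
            intro B' r
            rw [max_comm A B']
            exact pvLvl_congr A B' C B' A C _ (fun x _ _ => pvCnt_swap12 A B' C x) r 0
          rw [hswap, hswap]
          have hBm' : max (max B A) C = B := by omega
          rw [hBm']
          have := pvStep B A C ((n + 1 : Nat) : Int) (by omega) (by omega) (by omega) hrem
          rw [this]
          have : (((n + 1 : Nat) : Int) - 1) = (n : Int) := by push_cast; omega
          rw [this, hBm]; ring
        · rw [if_neg hA, if_neg hBm, pvAloop_acc, ih]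
          have hCm : max (max A B) C = C := by omega
          have hrot : ∀ C' r : Int, pvLvl A B C' (max (max A B) C').toNat r 0
              = pvLvl C' A B (max (max C' A) B).toNat r 0 := by
            intro C' r
            have hm : max (max A B) C' = max (max C' A) B := by omega
            rw [hm]
            exact pvLvl_congr A B C' C' A B _ (fun x _ _ => pvCnt_rot A B C' x) r 0
          rw [hrot, hrot]
          have hCm' : max (max C A) B = C := by omega
          rw [hCm']
          have := pvStep C A B ((n + 1 : Nat) : Int) (by omega) (by omega) (by omega) hrem
          rw [this]
          have : (((n + 1 : Nat) : Int) - 1) = (n : Int) := by push_cast; omega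
          rw [this, hCm]; ring
    · rw [pvAloop_stall _ A B C 0 (by omega)]
      have : (max (max A B) C).toNat = 0 := by omega
      rw [this]
      rfl

-- ===== VERDICT (by name: the statement is the Claim_ definition above) =====
theorem getMaximumPoints_spec : Claim_equal_getMaximumPoints := by
  intro A B C N _
  show getMaximumPoints A B C N = getMaximumPoints_alt A B C N
  unfold getMaximumPoints getMaximumPoints_alt
  rw [pvMain]
  by_cases hN : 0 ≤ N
  · rw [Int.toNat_of_nonneg hN]
  · rw [pvLvl_nonpos _ _ _ _ _ _ (by omega), pvLvl_nonpos _ _ _ _ _ _ (by omega)]
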